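-- pv_equiv track=rewrite | github.com/MananSuri27/agentic_disambiguation | simulation/evaluation.py | _calculate_conversation_metrics
-- ===== SOURCE A (Python) =====
-- from typing import Dict, List, Any, Tuple, Optional
--
-- def _calculate_conversation_metrics(
--
--     conversation: List[Dict[str, Any]]
-- ) -> Dict[str, Any]:
--     """
--     Calculate metrics for the conversation - excluding automated messages.
--
--     Args:
--         conversation: List of conversation turns
--
--     Returns:
--         Conversation metrics
--     """
--     metrics = {}
--
--     # Only count human-relevant turns - exclude execution and confirmation messages
--     human_relevant_turns = []
--     for turn in conversation:
--         if turn.get("type") not in ["execution", "execution_result", "confirmation", "execution_retry", "execution_error"]: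
--             human_relevant_turns.append(turn)
--
--     metrics["total_turns"] = len(human_relevant_turns)
--
--     # Count user turns
--     user_turns = [turn for turn in human_relevant_turns if turn.get("role") == "user"]
--     metrics["user_turns"] = len(user_turns)
--
--     # Count agent turns (excluding automated)
--     agent_turns = [turn for turn in human_relevant_turns if turn.get("role") == "agent"]
--     metrics["agent_turns"] = len(agent_turns)
--
--     # Count clarification questions
--     clarification_turns = [
--         turn for turn in human_relevant_turns
--         if turn.get("role") == "agent" and turn.get("type") == "clarification"
--     ]
--     metrics["clarification_questions"] = len(clarification_turns)
--
--     # Count follow-up requests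
--     follow_up_turns = [
--         turn for turn in human_relevant_turns
--         if turn.get("role") == "user" and turn.get("type") == "follow_up"
--     ]
--     metrics["follow_up_requests"] = len(follow_up_turns)
--
--     return metrics
-- ===== SOURCE B (Python) =====
-- def _calculate_conversation_metrics(conversation):
--     """Single-pass version: five counters, one scan over the conversation."""
--     excluded = {"execution", "execution_result", "confirmation",
--                 "execution_retry", "execution_error"}
--     total = users = agents = clar = fup = 0
--     for turn in conversation:
--         t = turn.get("type")
--         if t in excluded:
--             continue
--         total += 1
--         r = turn.get("role")
--         if r == "user":
--             users += 1
--             if t == "follow_up":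
--                 fup += 1
--         elif r == "agent":
--             agents += 1
--             if t == "clarification":
--                 clar += 1
--     return {
--         "total_turns": total,
--         "user_turns": users,
--         "agent_turns": agents,
--         "clarification_questions": clar,
--         "follow_up_requests": fup,
--     }
-- ===== Notes on version B (the rewrite author's own statement) =====
-- stated objective: simpler
-- what changed: Replaces the five separate list-building passes (one filtered list plus four comprehensions) with a single accumulating pass over the conversation that maintains five integer counters and assembles the result dict at the end.
import Mathlib
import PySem

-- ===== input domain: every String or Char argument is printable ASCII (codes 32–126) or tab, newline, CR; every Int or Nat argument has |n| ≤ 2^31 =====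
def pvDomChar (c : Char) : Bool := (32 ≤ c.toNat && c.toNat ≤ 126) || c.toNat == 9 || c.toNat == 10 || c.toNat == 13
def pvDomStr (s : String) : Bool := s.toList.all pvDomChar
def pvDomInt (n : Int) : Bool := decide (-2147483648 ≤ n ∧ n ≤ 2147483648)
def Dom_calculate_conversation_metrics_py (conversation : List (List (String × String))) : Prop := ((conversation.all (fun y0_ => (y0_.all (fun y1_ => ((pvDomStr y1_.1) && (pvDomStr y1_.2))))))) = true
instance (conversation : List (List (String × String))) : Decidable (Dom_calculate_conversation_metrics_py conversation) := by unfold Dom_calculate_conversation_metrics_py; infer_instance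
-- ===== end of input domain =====

-- B is a single accumulating pass with five integer counters instead of A's five list-building passes (objective: simpler).

-- ===== PORT A =====
def pvExcluded : List String :=
  ["execution", "execution_result", "confirmation", "execution_retry", "execution_error"]

-- `turn.get("type") not in [...]`: None is not equal to any string, so it is kept
def pvKeep (turn : List (String × String)) : Bool :=
  ! pvExcluded.any (fun s => (PySem.Dict.mk turn).get? "type" == some s)

def calculate_conversation_metrics_py (conversation : List (List (String × String))) : List (String × Int) :=
  -- for turn in conversation: if … not in […]: human_relevant_turns.append(turn)
  let human := conversation.foldl
    (fun acc turn => if pvKeep turn then acc ++ [turn] else acc) []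
  let user_turns := human.filter (fun turn => (PySem.Dict.mk turn).get? "role" == some "user")
  let agent_turns := human.filter (fun turn => (PySem.Dict.mk turn).get? "role" == some "agent")
  let clarification_turns := human.filter (fun turn =>
    (PySem.Dict.mk turn).get? "role" == some "agent" && (PySem.Dict.mk turn).get? "type" == some "clarification")
  let follow_up_turns := human.filter (fun turn =>
    (PySem.Dict.mk turn).get? "role" == some "user" && (PySem.Dict.mk turn).get? "type" == some "follow_up")
  [("total_turns", (human.length : Int)),
   ("user_turns", (user_turns.length : Int)),
   ("agent_turns", (agent_turns.length : Int)),
   ("clarification_questions", (clarification_turns.length : Int)),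
   ("follow_up_requests", (follow_up_turns.length : Int))]

-- ===== PORT B =====
def pvStep (acc : Int × Int × Int × Int × Int) (turn : List (String × String)) :
    Int × Int × Int × Int × Int :=
  let t := (PySem.Dict.mk turn).get? "type"
  if pvExcluded.any (fun s => t == some s) then acc
  else
    let (tot, us, ag, cl, fu) := acc
    let r := (PySem.Dict.mk turn).get? "role"
    if r == some "user" then
      (tot + 1, us + 1, ag, cl, if t == some "follow_up" then fu + 1 else fu)
    else if r == some "agent" then
      (tot + 1, us, ag + 1, (if t == some "clarification" then cl + 1 else cl), fu)
    else (tot + 1, us, ag, cl, fu)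

def calculate_conversation_metrics_py_alt (conversation : List (List (String × String))) : List (String × Int) :=
  let c := conversation.foldl pvStep (0, 0, 0, 0, 0)
  [("total_turns", c.1),
   ("user_turns", c.2.1),
   ("agent_turns", c.2.2.1),
   ("clarification_questions", c.2.2.2.1),
   ("follow_up_requests", c.2.2.2.2)]

-- ===== PRECONDITION & SPEC =====
def Spec_calculate_conversation_metrics_py (conversation : List (List (String × String))) (out : List (String × Int)) : Prop := out = calculate_conversation_metrics_py_alt conversation
instance (conversation : List (List (String × String))) (out : List (String × Int)) : Decidable (Spec_calculate_conversation_metrics_py conversation out) := by unfold Spec_calculate_conversation_metrics_py; infer_instance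

-- ===== CLAIM (what is proved, stated in full; the proofs are below) =====
def Claim_equal_calculate_conversation_metrics_py : Prop := ∀ (conversation : List (List (String × String))), Dom_calculate_conversation_metrics_py conversation → Spec_calculate_conversation_metrics_py conversation (calculate_conversation_metrics_py conversation)

-- ===== LEMMAS AND PROOFS =====

-- predicates counted by A, expressed on a single turn
def pvRoleIs (r : String) (turn : List (String × String)) : Bool :=
  (PySem.Dict.mk turn).get? "role" == some r
def pvTypeIs (t : String) (turn : List (String × String)) : Bool :=
  (PySem.Dict.mk turn).get? "type" == some t

-- a "user" turn is never an "agent" turn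
theorem pvRole_user_not_agent (turn : List (String × String))
    (hu : pvRoleIs "user" turn = true) : pvRoleIs "agent" turn = false := by
  simp only [pvRoleIs] at hu ⊢
  rcases h : (PySem.Dict.mk turn).get? "role" with _ | v <;> simp [h] at hu ⊢
  intro hv; subst hv; simp at hu

-- B's fold computes A's five filter-lengths, shifted by the starting accumulator
theorem pvStep_foldl (l : List (List (String × String))) :
    ∀ (a b c d e : Int),
      l.foldl pvStep (a, b, c, d, e) =
        (a + ((l.filter pvKeep).length : Int),
         b + ((l.filter (fun x => pvRoleIs "user" x && pvKeep x)).length : Int),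
         c + ((l.filter (fun x => pvRoleIs "agent" x && pvKeep x)).length : Int),
         d + ((l.filter (fun x => (pvRoleIs "agent" x && pvTypeIs "clarification" x) && pvKeep x)).length : Int),
         e + ((l.filter (fun x => (pvRoleIs "user" x && pvTypeIs "follow_up" x) && pvKeep x)).length : Int)) := by
  induction l with
  | nil => intro a b c d e; simp
  | cons turn rest ih =>
    intro a b c d e
    simp only [List.foldl_cons, pvStep]
    by_cases hk : pvKeep turn
    · have hk' : (pvExcluded.any (fun s => (PySem.Dict.mk turn).get? "type" == some s)) = false := by
        simpa [pvKeep] using hk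
      simp only [hk', Bool.false_eq_true, if_false]
      by_cases hu : pvRoleIs "user" turn
      · have hna := pvRole_user_not_agent turn hu
        by_cases hf : pvTypeIs "follow_up" turn <;>
        · simp only [pvRoleIs, pvTypeIs] at hu hna hf
          simp [ih, List.filter_cons, hk, hu, hna, hf, pvRoleIs, pvTypeIs]
          omega
      · by_cases ha : pvRoleIs "agent" turn
        · have hu' : pvRoleIs "user" turn = false := by simpa using hu
          by_cases hc : pvTypeIs "clarification" turn <;>
          · simp only [pvRoleIs, pvTypeIs] at hu' ha hc
            simp [ih, List.filter_cons, hk, hu', ha, hc, pvRoleIs, pvTypeIs]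
            omega
        · have hu' : pvRoleIs "user" turn = false := by simpa using hu
          have ha' : pvRoleIs "agent" turn = false := by simpa using ha
          simp only [pvRoleIs] at hu' ha'
          simp [ih, List.filter_cons, hk, hu', ha', pvRoleIs, pvTypeIs]
          omega
    · have hk' : (pvExcluded.any (fun s => (PySem.Dict.mk turn).get? "type" == some s)) = true := by
        simpa [pvKeep] using hk
      have hkf : pvKeep turn = false := by simpa using hk
      simp [hk', List.filter_cons, hkf, ih]

-- ===== VERDICT (by name: the statement is the Claim_ definition above) =====
theorem calculate_conversation_metrics_py_spec : Claim_equal_calculate_conversation_metrics_py := by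
  intro conversation _
  unfold Spec_calculate_conversation_metrics_py calculate_conversation_metrics_py
    calculate_conversation_metrics_py_alt
  rw [PySem.List.foldl_append_if_eq_filter, pvStep_foldl]
  simp [List.filter_filter, pvRoleIs, pvTypeIs]
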